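-- pv_equiv track=rewrite | github.com/AlexRaudvee/ML-For-Context-In-AI-Assistant | src/codesearch/utils/eval.py | to_int_ids
-- ===== SOURCE A (Python) =====
-- from typing import Dict, List, Sequence, Tuple
--
-- def to_int_ids(ids: Sequence[str]) -> Tuple[List[int], Dict[str, int]]:
--     """
--     Map string IDs to stable integer IDs for Qdrant. Returns (int_ids, map).
--     """
--     mapping: Dict[str, int] = {}
--     int_ids: List[int] = []
--     for sid in ids:
--         if sid not in mapping:
--             mapping[sid] = len(mapping)
--         int_ids.append(mapping[sid])
--     return int_ids, mapping
-- ===== SOURCE B (Python) =====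
-- def to_int_ids(ids):
--     """
--     Map string IDs to stable integer IDs for Qdrant. Returns (int_ids, map).
--
--     Sort-based: sorting the (string, position) pairs groups equal strings
--     together; each group's first pair holds the string's earliest position.
--     Ranking those first-occurrence positions in ascending order yields the
--     same first-seen integer ids as a streaming assignment would.
--     """
--     ids = list(ids)
--     pairs = sorted((s, i) for i, s in enumerate(ids))
--     heads, prev = [], None
--     for s, i in pairs:
--         if prev != s:
--             heads.append(i)
--             prev = s
--     heads.sort()  # first-occurrence positions, in first-seen order
--     mapping = {ids[p]: r for r, p in enumerate(heads)}
--     int_ids = [mapping[s] for s in ids]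
--     return int_ids, mapping
-- ===== Notes on version B (the rewrite author's own statement) =====
-- stated objective: alternative
-- what changed: Replaces A's streaming first-seen dict assignment by a sort-group-rank algorithm: sort (string, position) pairs to group equal strings, take each group's smallest position as the string's first occurrence, sort those first-occurrence positions to recover first-seen order, and rank them to obtain the integer ids.
import Mathlib
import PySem

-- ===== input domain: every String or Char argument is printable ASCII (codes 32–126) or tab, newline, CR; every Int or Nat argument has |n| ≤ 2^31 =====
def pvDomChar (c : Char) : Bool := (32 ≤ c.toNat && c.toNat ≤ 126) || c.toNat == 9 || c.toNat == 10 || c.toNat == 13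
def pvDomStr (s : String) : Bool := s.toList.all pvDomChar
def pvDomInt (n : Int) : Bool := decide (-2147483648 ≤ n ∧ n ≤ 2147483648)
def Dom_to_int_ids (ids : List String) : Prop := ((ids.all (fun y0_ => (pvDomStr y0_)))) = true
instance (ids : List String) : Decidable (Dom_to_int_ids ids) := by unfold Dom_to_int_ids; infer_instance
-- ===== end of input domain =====

-- B replaces A's streaming first-seen dict assignment by a sort-group-rank algorithm (alternative,
-- similar cost): sort (string, position) pairs, take each group's first position, rank those.


-- ===== PORT A =====
-- one loop: if sid unseen, assign it the next integer; always append mapping[sid]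
def to_int_ids (ids : List String) : List Int × (List (String × Int)) :=
  let st := ids.foldl
    (fun (st : PySem.Dict String Int × List Int) sid =>
      let mapping := if !st.1.contains sid then st.1.insert sid (st.1.size : Int) else st.1
      (mapping, st.2 ++ [(mapping.get? sid).getD 0]))
    (PySem.Dict.empty, [])
  (st.2, st.1.items)

-- ===== PORT B =====
-- sort-group-rank: sorted (string, position) pairs; each group's first pair is the string's
-- first occurrence; sorting those positions restores first-seen order; rank = integer id.
-- ids[p] in the dict comprehension is always in range, and mapping[s] always hits: getD exact.
def to_int_ids_alt (ids : List String) : List Int × (List (String × Int)) :=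
  let pairs := PySem.List.sorted2 ((PySem.List.enumerate ids).map (fun p => (p.2, p.1)))
      (fun q => q.1) (fun q => q.2)
  let hp := pairs.foldl
    (fun (st : List Int × Option String) q =>
      if st.2 ≠ some q.1 then (st.1 ++ [q.2], some q.1) else st) ([], none)
  let heads := PySem.List.sorted hp.1 (fun x => x)
  let mapping := (PySem.List.enumerate heads).foldl
    (fun (d : PySem.Dict String Int) rp => d.insert ((PySem.List.pyGet? ids rp.2).getD "") rp.1)
    PySem.Dict.empty
  let int_ids := ids.map (fun s => (mapping.get? s).getD 0)
  (int_ids, mapping.items)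

-- ===== PRECONDITION & SPEC =====
def Spec_to_int_ids (ids : List String) (out : List Int × (List (String × Int))) : Prop := out = to_int_ids_alt ids
instance (ids : List String) (out : List Int × (List (String × Int))) : Decidable (Spec_to_int_ids ids out) := by unfold Spec_to_int_ids; infer_instance

-- ===== CLAIM (what is proved, stated in full; the proofs are below) =====
def Claim_equal_to_int_ids : Prop := ∀ (ids : List String), Dom_to_int_ids ids → Spec_to_int_ids ids (to_int_ids ids)

-- ===== LEMMAS AND PROOFS =====

/-- The dict whose items are `s` paired with its positions. -/
def dmk (s : List String) : PySem.Dict String Int :=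
  PySem.Dict.mk ((PySem.List.enumerate s).map (fun p => (p.2, p.1)))

theorem keys_dmk (s : List String) : (dmk s).keys = s := by
  simp [dmk, PySem.Dict.keys, List.map_map, Function.comp_def, PySem.List.map_snd_enumerate]

theorem contains_dmk (s : List String) (y : String) :
    (dmk s).contains y = decide (y ∈ s) := by
  rw [PySem.Dict.contains_eq_decide_mem_keys, keys_dmk]

theorem size_dmk (s : List String) : (dmk s).size = s.length := by
  simp [dmk, PySem.Dict.size, PySem.List.length_enumerate]

theorem get?_mk_append (l1 l2 : List (String × Int)) (y : String) :
    (PySem.Dict.mk (l1 ++ l2)).get? y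
      = ((PySem.Dict.mk l1).get? y).or ((PySem.Dict.mk l2).get? y) := by
  induction l1 with
  | nil => simp [PySem.Dict.get?]
  | cons p l1 ih =>
    obtain ⟨k, v⟩ := p
    rw [List.cons_append, PySem.Dict.get?_mk_cons, PySem.Dict.get?_mk_cons]
    by_cases h : k == y
    · simp [h]
    · simp [h, ih]

theorem insert_dmk (s : List String) (x : String) (h : x ∉ s) :
    (dmk s).insert x ((s.length : Int)) = dmk (s ++ [x]) := by
  apply PySem.Dict.ext
  rw [PySem.Dict.items_insert_of_not_contains]
  · simp [dmk, PySem.List.enumerate_append, PySem.List.enumerate_cons,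
      PySem.List.enumerate_nil]
  · rw [contains_dmk]; simp [h]

theorem get?_dmk_of_mem_prefix (s t : List String) (y : String) (hy : y ∈ s) :
    (dmk (s ++ t)).get? y = (dmk s).get? y := by
  have hsplit : (PySem.List.enumerate (s ++ t)).map (fun p => (p.2, p.1))
      = (PySem.List.enumerate s).map (fun p => (p.2, p.1))
        ++ (PySem.List.enumerate t (s.length : Int)).map (fun p => (p.2, p.1)) := by
    rw [PySem.List.enumerate_append]; simp
  rw [dmk, hsplit, get?_mk_append]
  have hs : (dmk s).get? y ≠ none := by
    intro h
    rw [PySem.Dict.get?_eq_none_iff_not_mem_keys, keys_dmk] at h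
    exact h hy
  cases hval : (dmk s).get? y with
  | none => exact absurd hval hs
  | some v =>
    have h1 : (PySem.Dict.mk ((PySem.List.enumerate s).map (fun p => (p.2, p.1)))).get? y
        = some v := hval
    rw [h1]
    rfl

/-- Loop invariant for A's fold. -/
theorem loopA (ids : List String) : ∀ (s : List String) (acc : List Int), s.Nodup →
    ids.foldl
      (fun (st : PySem.Dict String Int × List Int) sid =>
        let mapping := if !st.1.contains sid then st.1.insert sid (st.1.size : Int) else st.1
        (mapping, st.2 ++ [(mapping.get? sid).getD 0]))
      (dmk s, acc)
    = (dmk (PySem.Set.update s ids),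
       acc ++ ids.map (fun y => ((dmk (PySem.Set.update s ids)).get? y).getD 0)) := by
  induction ids with
  | nil => intro s acc hnd; simp [PySem.Set.update]
  | cons x xs ih =>
    intro s acc hnd
    rw [List.foldl_cons]
    have hupd : PySem.Set.update s (x :: xs) = PySem.Set.update (PySem.Set.add s x) xs :=
      PySem.Set.update_cons s x xs
    by_cases hx : x ∈ s
    · have hc : (dmk s).contains x = true := by rw [contains_dmk]; simp [hx]
      have hadd : PySem.Set.add s x = s := PySem.Set.add_of_mem hx
      obtain ⟨t, ht⟩ : ∃ t, PySem.Set.update s xs = s ++ t :=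
        ⟨_, PySem.Set.update_eq_append_filter s xs⟩
      have hhead : ((dmk (PySem.Set.update s xs)).get? x).getD 0 = ((dmk s).get? x).getD 0 := by
        rw [ht, get?_dmk_of_mem_prefix s t x hx]
      simp only [hc, Bool.not_true, Bool.false_eq_true, if_false]
      rw [ih s (acc ++ [((dmk s).get? x).getD 0]) hnd]
      rw [hupd, hadd, List.map_cons, hhead]
      simp
    · have hc : (dmk s).contains x = false := by rw [contains_dmk]; simp [hx]
      have hadd : PySem.Set.add s x = s ++ [x] := PySem.Set.add_of_not_mem hx
      have hnd' : (s ++ [x]).Nodup :=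
        List.Nodup.append hnd (List.nodup_singleton x) (by simpa using hx)
      obtain ⟨t, ht⟩ : ∃ t, PySem.Set.update (s ++ [x]) xs = (s ++ [x]) ++ t :=
        ⟨_, PySem.Set.update_eq_append_filter (s ++ [x]) xs⟩
      have hhead : ((dmk (PySem.Set.update (s ++ [x]) xs)).get? x).getD 0
          = ((dmk (s ++ [x])).get? x).getD 0 := by
        rw [ht, get?_dmk_of_mem_prefix (s ++ [x]) t x (by simp)]
      simp only [hc, Bool.not_false, if_true, size_dmk, insert_dmk s x hx]
      rw [ih (s ++ [x]) (acc ++ [((dmk (s ++ [x])).get? x).getD 0]) hnd']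
      rw [hupd, hadd, List.map_cons, hhead]
      simp

/-- A's value in canonical form. -/
theorem A_canon (ids : List String) :
    to_int_ids ids
      = (ids.map (fun y => ((dmk (PySem.List.dedup ids)).get? y).getD 0),
         (dmk (PySem.List.dedup ids)).items) := by
  unfold to_int_ids
  have h0 : (PySem.Dict.empty : PySem.Dict String Int) = dmk [] := by
    simp [dmk, PySem.List.enumerate_nil, PySem.Dict.empty]
  have hded : PySem.Set.update [] ids = PySem.List.dedup ids := by
    rw [PySem.List.dedup_eq_ofList]; rfl
  rw [h0, loopA ids [] [] List.nodup_nil, hded]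
  rfl

-- ===== B-side machinery =====

/-- Ascending positions of `s` in `ids`. -/
def occL (ids : List String) (s : String) : List Int :=
  (PySem.List.enumerate ids).filterMap (fun p => if p.2 = s then some p.1 else none)

/-- Distinct strings of `ids`, ascending. -/
def ssL (ids : List String) : List String :=
  PySem.List.sorted (PySem.List.dedup ids) (fun x => x)

/-- The sorted pair list, grouped by string. -/
def grp (ids : List String) : List (String × Int) :=
  (ssL ids).flatMap (fun s => (occL ids s).map (fun i => (s, i)))

theorem sorted2_lex (xs : List (String × Int)) :
    PySem.List.sorted2 xs (fun q => q.1) (fun q => q.2)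
      = PySem.List.sorted xs (fun q => toLex q) := by
  have h : (fun (a b : String × Int) =>
        decide (a.1 < b.1) || (!decide (b.1 < a.1) && decide (a.2 < b.2)))
      = (fun (a b : String × Int) => decide (toLex a < toLex b)) := by
    funext a b
    by_cases h1 : a.1 < b.1
    · simp [h1, Prod.Lex.lt_iff]
    · by_cases h2 : b.1 < a.1
      · have h3 : ¬ (a.1 = b.1) := fun e => lt_irrefl _ (e ▸ h2)
        simp [h1, h2, h3, Prod.Lex.lt_iff]
      · have h3 : a.1 = b.1 := le_antisymm (not_lt.1 h2) (not_lt.1 h1)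
        simp [h3, Prod.Lex.lt_iff]
  have e1 : PySem.List.sorted2 xs (fun q => q.1) (fun q => q.2)
      = List.foldl (fun acc x => PySem.List.insertBy
          (fun (a b : String × Int) =>
            decide (a.1 < b.1) || (!decide (b.1 < a.1) && decide (a.2 < b.2))) x acc) [] xs := rfl
  have e2 : PySem.List.sorted xs (fun q => toLex q)
      = List.foldl (fun acc x => PySem.List.insertBy
          (fun (a b : String × Int) => decide (toLex a < toLex b)) x acc) [] xs := rfl
  rw [e1, e2, h]

theorem pairwise_occL (ids : List String) (s : String) :
    (occL ids s).Pairwise (· < ·) := by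
  rw [occL, List.pairwise_filterMap]
  refine (PySem.List.pairwise_lt_enumerate ids 0).imp ?_
  intro p q h b hb b' hb'
  have hb1 : b = p.1 := by
    split at hb
    · exact (Option.some.inj hb).symm
    · simp at hb
  have hb2 : b' = q.1 := by
    split at hb'
    · exact (Option.some.inj hb').symm
    · simp at hb'
  rw [hb1, hb2]
  exact h

theorem mem_occL (ids : List String) (s : String) (i : Int) :
    i ∈ occL ids s ↔ ∃ (k : Nat) (h : k < ids.length), i = (k : Int) ∧ ids[k] = s := by
  rw [occL, List.mem_filterMap]
  constructor
  · rintro ⟨p, hp, hf⟩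
    rw [PySem.List.mem_enumerate_iff] at hp
    obtain ⟨k, hk, rfl⟩ := hp
    split at hf
    · exact ⟨k, hk, by simpa using hf.symm, by assumption⟩
    · simp at hf
  · rintro ⟨k, hk, rfl, hs⟩
    refine ⟨((k : Int), ids[k]), ?_, ?_⟩
    · rw [PySem.List.mem_enumerate_iff]; exact ⟨k, hk, by simp⟩
    · simp [hs]

theorem occL_ne_nil (ids : List String) (s : String) (hs : s ∈ ids) : occL ids s ≠ [] := by
  obtain ⟨k, hk, he⟩ := List.mem_iff_getElem.1 hs
  intro h
  have : (k : Int) ∈ occL ids s := (mem_occL ids s _).2 ⟨k, hk, rfl, he⟩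
  simp [h] at this

theorem pairwise_ssL (ids : List String) : (ssL ids).Pairwise (· < ·) := by
  rw [ssL, PySem.List.dedup_eq_ofList]
  exact PySem.List.sorted_ofList_pairwise_lt ids

theorem mem_ssL (ids : List String) (s : String) : s ∈ ssL ids ↔ s ∈ ids := by
  rw [ssL, PySem.List.mem_sorted, PySem.List.mem_dedup]

theorem pairwise_grp (ids : List String) :
    (grp ids).Pairwise (fun a b => toLex a < toLex b) := by
  rw [grp, List.pairwise_flatMap]
  constructor
  · intro s _
    rw [List.pairwise_map]
    refine (pairwise_occL ids s).imp ?_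
    intro i j hij
    rw [Prod.Lex.lt_iff]
    exact Or.inr ⟨rfl, hij⟩
  · refine (pairwise_ssL ids).imp ?_
    intro s t hst x hx y hy
    rw [List.mem_map] at hx hy
    obtain ⟨i, _, rfl⟩ := hx
    obtain ⟨j, _, rfl⟩ := hy
    rw [Prod.Lex.lt_iff]
    exact Or.inl hst

theorem nodup_grp (ids : List String) : (grp ids).Nodup :=
  (pairwise_grp ids).imp (fun h e => absurd (e ▸ h) (lt_irrefl _))

theorem mem_grp (ids : List String) (q : String × Int) :
    q ∈ grp ids ↔ ∃ (k : Nat) (h : k < ids.length), q = (ids[k], (k : Int)) := by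
  rw [grp, List.mem_flatMap]
  constructor
  · rintro ⟨s, hs, hq⟩
    rw [List.mem_map] at hq
    obtain ⟨i, hi, rfl⟩ := hq
    obtain ⟨k, hk, rfl, he⟩ := (mem_occL ids s i).1 hi
    exact ⟨k, hk, by rw [he]⟩
  · rintro ⟨k, hk, rfl⟩
    refine ⟨ids[k], (mem_ssL ids _).2 (List.getElem_mem hk), ?_⟩
    rw [List.mem_map]
    exact ⟨(k : Int), (mem_occL ids _ _).2 ⟨k, hk, rfl, rfl⟩, rfl⟩

theorem nodup_zipped (ids : List String) :
    ((PySem.List.enumerate ids).map (fun p => (p.2, p.1))).Nodup := by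
  have h := ((PySem.List.pairwise_lt_enumerate ids 0).map
      (S := fun (x y : String × Int) => x.2 < y.2)
      (fun (p : Int × String) => (p.2, p.1)) (fun a b hab => hab))
  exact h.imp (fun {a b} hab e => absurd (e ▸ hab) (lt_irrefl _))

theorem mem_zipped (ids : List String) (q : String × Int) :
    q ∈ (PySem.List.enumerate ids).map (fun p => (p.2, p.1))
      ↔ ∃ (k : Nat) (h : k < ids.length), q = (ids[k], (k : Int)) := by
  rw [List.mem_map]
  constructor
  · rintro ⟨p, hp, rfl⟩
    rw [PySem.List.mem_enumerate_iff] at hp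
    obtain ⟨k, hk, rfl⟩ := hp
    exact ⟨k, hk, by simp⟩
  · rintro ⟨k, hk, rfl⟩
    refine ⟨((k : Int), ids[k]), ?_, rfl⟩
    rw [PySem.List.mem_enumerate_iff]
    exact ⟨k, hk, by simp⟩

theorem pairs_eq (ids : List String) :
    PySem.List.sorted ((PySem.List.enumerate ids).map (fun p => (p.2, p.1)))
      (fun q => toLex q) = grp ids := by
  apply PySem.List.sorted_eq_of_perm_of_pairwise_lt
  · apply List.perm_of_nodup_nodup_toFinset_eq (nodup_grp ids) (nodup_zipped ids)
    ext q
    simp only [List.mem_toFinset, mem_grp, mem_zipped]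
  · exact pairwise_grp ids

-- ===== B scan, heads, dict =====

/-- The scan step of B's head-collecting loop. -/
def bstep (st : List Int × Option String) (q : String × Int) : List Int × Option String :=
  if st.2 ≠ some q.1 then (st.1 ++ [q.2], some q.1) else st

theorem scan_group (is : List Int) (s : String) (acc : List Int) :
    List.foldl bstep (acc, some s) (is.map (fun i => (s, i))) = (acc, some s) := by
  induction is with
  | nil => rfl
  | cons i tl ih => simpa [bstep] using ih

theorem scan_flat (ids : List String) : ∀ (ss : List String) (prev : Option String) (acc : List Int),
    ss.Pairwise (· < ·) → (∀ s ∈ ss, occL ids s ≠ []) → (∀ s ∈ ss, prev ≠ some s) →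
    ∃ p, List.foldl bstep (acc, prev) (ss.flatMap (fun s => (occL ids s).map (fun i => (s, i))))
      = (acc ++ ss.map (fun s => (occL ids s).headD 0), p) := by
  intro ss
  induction ss with
  | nil => intro prev acc _ _ _; exact ⟨prev, by simp⟩
  | cons s tl ih =>
    intro prev acc hpw hne hprev
    obtain ⟨i, r, hir⟩ := List.exists_cons_of_ne_nil (hne s (List.mem_cons_self))
    rw [List.flatMap_cons, List.foldl_append, hir, List.map_cons, List.foldl_cons]
    have hst : bstep (acc, prev) (s, i) = (acc ++ [i], some s) := by
      simp [bstep, hprev s List.mem_cons_self]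
    rw [hst, scan_group r s (acc ++ [i])]
    rw [List.pairwise_cons] at hpw
    obtain ⟨p, hp⟩ := ih (some s) (acc ++ [i]) hpw.2
      (fun t ht => hne t (List.mem_cons_of_mem s ht))
      (fun t ht e => absurd (by simpa using e) (ne_of_lt (hpw.1 t ht)))
    refine ⟨p, ?_⟩
    rw [hp]
    simp [hir]

/-- First-occurrence position of each string. -/
def hdP (ids : List String) (s : String) : Int := (occL ids s).headD 0

theorem hp_eq (ids : List String) :
    ((grp ids).foldl bstep ([], none)).1 = (ssL ids).map (fun s => hdP ids s) := by
  obtain ⟨p, hp⟩ := scan_flat ids (ssL ids) none []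
    (pairwise_ssL ids)
    (fun s hs => occL_ne_nil ids s ((mem_ssL ids s).1 hs))
    (fun s _ => by simp)
  unfold grp
  rw [hp]
  simp [hdP]

-- ===== first occurrences and idxOf =====

theorem filterMap_enum_head : ∀ (l : List String) (st : Int) (s : String), s ∈ l →
    ((PySem.List.enumerate l st).filterMap
        (fun p => if p.2 = s then some p.1 else none)).headD 0
      = st + (l.idxOf s : Int) := by
  intro l
  induction l with
  | nil => intro st s hs; simp at hs
  | cons x tl ih =>
    intro st s hs
    rw [PySem.List.enumerate_cons, List.filterMap_cons]
    by_cases hx : x = s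
    · subst hx
      rw [List.idxOf_cons_self]
      simp
    · rw [if_neg (by simpa using hx)]
      have hs' : s ∈ tl := by
        rcases List.mem_cons.1 hs with h | h
        · exact absurd h.symm hx
        · exact h
      rw [ih (st + 1) s hs', List.idxOf_cons_ne tl hx]
      push_cast
      ring

theorem occ_headD (ids : List String) (s : String) (hs : s ∈ ids) :
    hdP ids s = (ids.idxOf s : Int) := by
  have h := filterMap_enum_head ids 0 s hs
  simpa [hdP, occL] using h

theorem filter_idxOf_mono : ∀ (xs : List String) (x s t : String),
    s ∈ xs.filter (fun y => decide (y ≠ x)) → t ∈ xs.filter (fun y => decide (y ≠ x)) →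
    (xs.filter (fun y => decide (y ≠ x))).idxOf s < (xs.filter (fun y => decide (y ≠ x))).idxOf t →
    xs.idxOf s < xs.idxOf t := by
  intro xs
  induction xs with
  | nil => intro x s t hs ht h; simp at hs
  | cons y tl ih =>
    intro x s t hs ht h
    have hst : s ≠ t := by
      intro e
      subst e
      exact lt_irrefl _ h
    by_cases hys : y = s
    · subst hys
      rw [List.idxOf_cons_self, List.idxOf_cons_ne tl hst]
      exact Nat.succ_pos _
    · by_cases hyt : y = t
      · have htx : t ≠ x := by simpa using (List.mem_filter.1 ht).2
        have hyx : y ≠ x := fun e => htx (hyt.symm.trans e)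
        rw [List.filter_cons, if_pos (by simpa using hyx)] at h
        rw [hyt, List.idxOf_cons_self] at h
        exact absurd h (Nat.not_lt_zero _)
      · by_cases hyx : y = x
        · subst hyx
          rw [List.filter_cons, if_neg (by simp)] at hs ht h
          have h2 := ih y s t hs ht h
          rw [List.idxOf_cons_ne tl hys, List.idxOf_cons_ne tl hyt]
          omega
        · rw [List.filter_cons, if_pos (by simpa using hyx)] at hs ht h
          have hs' : s ∈ tl.filter (fun y_1 => decide (y_1 ≠ x)) := by
            rcases List.mem_cons.1 hs with h' | h'
            · exact absurd h'.symm hys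
            · exact h'
          have ht' : t ∈ tl.filter (fun y_1 => decide (y_1 ≠ x)) := by
            rcases List.mem_cons.1 ht with h' | h'
            · exact absurd h'.symm hyt
            · exact h'
          rw [List.idxOf_cons_ne _ hys, List.idxOf_cons_ne _ hyt] at h
          have h2 := ih x s t hs' ht' (Nat.succ_lt_succ_iff.1 h)
          rw [List.idxOf_cons_ne tl hys, List.idxOf_cons_ne tl hyt]
          omega

-- ===== dedup structure =====

theorem update_filter : ∀ (xs s : List String) (a : String), a ∈ s →
    PySem.Set.update s xs = PySem.Set.update s (xs.filter (fun y => decide (y ≠ a))) := by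
  intro xs
  induction xs with
  | nil => intro s a _; rfl
  | cons y tl ih =>
    intro s a ha
    rw [List.filter_cons]
    by_cases hy : y = a
    · subst hy
      rw [if_neg (by simp)]
      have : PySem.Set.update s (y :: tl) = PySem.Set.update (PySem.Set.add s y) tl :=
        PySem.Set.update_cons s y tl
      rw [this, PySem.Set.add_of_mem ha]
      exact ih s y ha
    · rw [if_pos (by simpa using hy)]
      rw [PySem.Set.update_cons s y tl, PySem.Set.update_cons s y (tl.filter _)]
      exact ih (PySem.Set.add s y) a ((PySem.Set.mem_add s y a).2 (Or.inl ha))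

theorem update_cons_nomem : ∀ (xs s : List String) (x : String), x ∉ xs →
    PySem.Set.update (x :: s) xs = x :: PySem.Set.update s xs := by
  intro xs
  induction xs with
  | nil => intro s x _; rfl
  | cons y tl ih =>
    intro s x hx
    have hxy : ¬ (y == x) := by
      simp only [beq_iff_eq]
      intro e
      exact hx (by simp [e])
    rw [PySem.Set.update_cons (x :: s) y tl, PySem.Set.update_cons s y tl]
    have hc : (y == x) = false := by
      simpa using hxy
    have hadd : PySem.Set.add (x :: s) y = x :: PySem.Set.add s y := by
      unfold PySem.Set.add PySem.Set.contains
      rw [List.contains_cons, hc, Bool.false_or]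
      split_ifs with h
      · rfl
      · rfl
    rw [hadd]
    exact ih (PySem.Set.add s y) x (fun h => hx (List.mem_cons_of_mem y h))

theorem dedup_cons (x : String) (xs : List String) :
    PySem.List.dedup (x :: xs)
      = x :: PySem.List.dedup (xs.filter (fun y => decide (y ≠ x))) := by
  rw [PySem.List.dedup_eq_ofList, PySem.List.dedup_eq_ofList]
  have h1 : PySem.Set.ofList (x :: xs) = PySem.Set.update [x] xs := by
    rw [PySem.Set.ofList_eq_foldl]
    rfl
  have h2 : PySem.Set.ofList (xs.filter (fun y => decide (y ≠ x)))
      = PySem.Set.update [] (xs.filter (fun y => decide (y ≠ x))) := by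
    rw [PySem.Set.ofList_eq_foldl]
    rfl
  rw [h1, h2, update_filter xs [x] x (by simp)]
  exact update_cons_nomem _ [] x (by simp)

theorem dedup_idxOf_pairwise : ∀ (n : Nat) (ids : List String), ids.length ≤ n →
    (PySem.List.dedup ids).Pairwise (fun s t => ids.idxOf s < ids.idxOf t) := by
  intro n
  induction n with
  | zero =>
    intro ids h
    rw [List.eq_nil_of_length_eq_zero (Nat.le_zero.1 h)]
    constructor
  | succ n ih =>
    intro ids h
    match ids with
    | [] => constructor
    | x :: xs =>
      rw [dedup_cons, List.pairwise_cons]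
      constructor
      · intro t ht
        have htf : t ∈ xs.filter (fun y => decide (y ≠ x)) :=
          (PySem.List.mem_dedup _ _).1 ht
        have htx : t ≠ x := by simpa using (List.mem_filter.1 htf).2
        rw [List.idxOf_cons_self, List.idxOf_cons_ne xs htx.symm]
        exact Nat.succ_pos _
      · have hlen : (xs.filter (fun y => decide (y ≠ x))).length ≤ n :=
          le_trans (List.length_filter_le _ _) (by simpa using h)
        refine (ih _ hlen).imp_of_mem ?_
        intro s t hs ht hrel
        have hsf := (PySem.List.mem_dedup _ _).1 hs
        have htf := (PySem.List.mem_dedup _ _).1 ht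
        have hsx : s ≠ x := by simpa using (List.mem_filter.1 hsf).2
        have htx : t ≠ x := by simpa using (List.mem_filter.1 htf).2
        have h2 := filter_idxOf_mono xs x s t hsf htf hrel
        rw [List.idxOf_cons_ne xs hsx.symm, List.idxOf_cons_ne xs htx.symm]
        omega

theorem heads_sorted (ids : List String) :
    PySem.List.sorted ((ssL ids).map (fun s => hdP ids s)) (fun x => x)
      = (PySem.List.dedup ids).map (fun s => hdP ids s) := by
  apply PySem.List.sorted_eq_of_perm_of_pairwise_lt
  · exact ((PySem.List.sorted_perm (PySem.List.dedup ids) (fun x => x) false).symm.map _)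
  · rw [List.pairwise_map]
    refine (dedup_idxOf_pairwise ids.length ids le_rfl).imp_of_mem ?_
    intro s t hs ht hrel
    have hs' : s ∈ ids := (PySem.List.mem_dedup _ _).1 hs
    have ht' : t ∈ ids := (PySem.List.mem_dedup _ _).1 ht
    rw [occ_headD ids s hs', occ_headD ids t ht']
    exact_mod_cast hrel

-- ===== the mapping dict =====

theorem enum_map (f : String → Int) : ∀ (l : List String) (st : Int),
    PySem.List.enumerate (l.map f) st
      = (PySem.List.enumerate l st).map (fun p => (p.1, f p.2)) := by
  intro l
  induction l with
  | nil => intro st; rfl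
  | cons x tl ih => intro st; rw [List.map_cons, PySem.List.enumerate_cons,
      PySem.List.enumerate_cons, List.map_cons, ih]

theorem dict_build : ∀ (t done : List String), (done ++ t).Nodup →
    (PySem.List.enumerate t (done.length : Int)).foldl
      (fun (d : PySem.Dict String Int) rp => d.insert rp.2 rp.1) (dmk done)
    = dmk (done ++ t) := by
  intro t
  induction t with
  | nil => intro done h; simp [PySem.List.enumerate_nil]
  | cons x tl ih =>
    intro done h
    rw [PySem.List.enumerate_cons, List.foldl_cons]
    have hx : x ∉ done := by
      rw [List.nodup_append] at h
      intro hmem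
      exact h.2.2 x hmem x List.mem_cons_self rfl
    have hins : (dmk done).insert x ((done.length : Int)) = dmk (done ++ [x]) :=
      insert_dmk done x hx
    have hlen : (done.length : Int) + 1 = ((done ++ [x]).length : Int) := by
      simp
    rw [show ((dmk done).insert ((done.length : Int), x).2 ((done.length : Int), x).1)
        = dmk (done ++ [x]) from hins, hlen,
      ih (done ++ [x]) (by simpa using h)]
    simp

theorem pyGet_first (ids : List String) (s : String) (hs : s ∈ ids) :
    (PySem.List.pyGet? ids (hdP ids s)).getD "" = s := by
  rw [occ_headD ids s hs, PySem.List.pyGet?_natCast,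
    List.getElem?_eq_getElem (List.idxOf_lt_length_of_mem hs), List.getElem_idxOf]
  rfl

/-- B's value in canonical form. -/
theorem B_canon (ids : List String) :
    to_int_ids_alt ids
      = (ids.map (fun y => ((dmk (PySem.List.dedup ids)).get? y).getD 0),
         (dmk (PySem.List.dedup ids)).items) := by
  show
    (let pairs := PySem.List.sorted2 ((PySem.List.enumerate ids).map (fun p => (p.2, p.1)))
        (fun q => q.1) (fun q => q.2)
     let hp := pairs.foldl
       (fun (st : List Int × Option String) q =>
         if st.2 ≠ some q.1 then (st.1 ++ [q.2], some q.1) else st) ([], none)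
     let heads := PySem.List.sorted hp.1 (fun x => x)
     let mapping := (PySem.List.enumerate heads).foldl
       (fun (d : PySem.Dict String Int) rp =>
         d.insert ((PySem.List.pyGet? ids rp.2).getD "") rp.1)
       PySem.Dict.empty
     let int_ids := ids.map (fun s => (mapping.get? s).getD 0)
     (int_ids, mapping.items)) = _
  simp only [sorted2_lex, pairs_eq,
    show (fun (st : List Int × Option String) q =>
        if st.2 ≠ some q.1 then (st.1 ++ [q.2], some q.1) else st) = bstep from rfl,
    hp_eq, heads_sorted]
  have hmap : (PySem.List.enumerate ((PySem.List.dedup ids).map (fun s => hdP ids s))).foldl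
      (fun (d : PySem.Dict String Int) rp =>
        d.insert ((PySem.List.pyGet? ids rp.2).getD "") rp.1)
      PySem.Dict.empty = dmk (PySem.List.dedup ids) := by
    rw [enum_map, List.foldl_map]
    have hcongr := PySem.List.foldl_congr_mem (PySem.List.enumerate (PySem.List.dedup ids) 0)
      (fun (d : PySem.Dict String Int) p =>
        d.insert ((PySem.List.pyGet? ids (hdP ids p.2)).getD "") p.1)
      (fun (d : PySem.Dict String Int) p => d.insert p.2 p.1)
      PySem.Dict.empty ?_
    · rw [hcongr]
      have h0 : (PySem.Dict.empty : PySem.Dict String Int) = dmk [] := by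
        simp [dmk, PySem.List.enumerate_nil, PySem.Dict.empty]
      have hres := dict_build (PySem.List.dedup ids) []
        (by simpa using PySem.List.nodup_dedup ids)
      simp only [List.length_nil, Int.ofNat_zero, List.nil_append] at hres
      rw [h0]
      exact hres
    · intro acc p hp
      show acc.insert ((PySem.List.pyGet? ids (hdP ids p.2)).getD "") p.1
          = acc.insert p.2 p.1
      have hmem : p.2 ∈ PySem.List.dedup ids := by
        have := PySem.List.mem_enumerate_iff (PySem.List.dedup ids) 0 p
        obtain ⟨k, hk, rfl⟩ := this.1 hp
        exact List.getElem_mem hk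
      rw [pyGet_first ids p.2 ((PySem.List.mem_dedup _ _).1 hmem)]
  rw [hmap]

-- ===== VERDICT (by name: the statement is the Claim_ definition above) =====
theorem to_int_ids_spec : Claim_equal_to_int_ids := by
  intro ids _
  unfold Spec_to_int_ids
  rw [A_canon, B_canon]
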